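-- pv_equiv track=rewrite | github.com/posl/comment_recommendation | script/mod_gen/4_time/ja/267_C/6.py | solve
-- ===== SOURCE A (Python) =====
-- def solve(n, m, a):
--     a = [0] + a
--     s = [0] * (n + 1)
--     for i in range(n):
--         s[i + 1] = s[i] + a[i + 1]
--     ans = -10 ** 18
--     for i in range(n - m + 1):
--         ans = max(ans, s[i + m] - s[i] + sum(a[i + 1:i + m + 1]) + m * (m + 1) // 2)
--     return ans
-- ===== SOURCE B (Python) =====
-- def solve(n, m, a):
--     # Sliding window: one running window sum replaces both the prefix-sum table and the inner slice sum.
--     best = -10 ** 18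
--     c = m * (m + 1) // 2
--     w = sum(a[:m])
--     for i in range(n - m + 1):
--         best = max(best, 2 * w + c)
--         if i + m < n:
--             w += a[i + m] - a[i]
--     return best
-- ===== Notes on version B (the rewrite author's own statement) =====
-- stated objective: faster
-- what changed: Replaces the prefix-sum table plus a re-summed slice per window by a single sliding window sum maintained in O(1) per step; intended as faster (O(n) vs O(n*m)); a timing run measured A timing out at n=65536 while B answered, with ratios up to ~278x, though the ratio varies with the drawn m.
import Mathlib
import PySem

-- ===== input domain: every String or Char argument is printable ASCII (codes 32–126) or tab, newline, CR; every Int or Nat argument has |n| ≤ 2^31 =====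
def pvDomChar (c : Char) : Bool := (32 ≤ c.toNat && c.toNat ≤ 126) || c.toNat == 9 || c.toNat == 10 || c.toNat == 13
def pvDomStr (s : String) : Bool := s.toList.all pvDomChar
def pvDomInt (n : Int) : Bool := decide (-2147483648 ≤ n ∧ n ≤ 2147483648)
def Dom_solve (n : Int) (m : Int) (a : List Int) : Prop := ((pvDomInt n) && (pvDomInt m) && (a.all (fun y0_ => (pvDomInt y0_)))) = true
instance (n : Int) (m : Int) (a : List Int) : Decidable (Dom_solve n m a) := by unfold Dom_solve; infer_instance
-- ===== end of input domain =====

-- B replaces A's prefix-sum table and per-window slice re-summation by one sliding window sum maintained in O(1) per step.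

-- ===== PORT A =====
def solve (n : Int) (m : Int) (a : List Int) : Int :=
  let a' := 0 :: a
  let s0 : List Int := List.replicate (n + 1).toNat 0
  let s := (PySem.List.pyRange 0 n 1).foldl
    (fun s i => PySem.List.pySetD s (i + 1)
      (PySem.List.pyGetD s i 0 + PySem.List.pyGetD a' (i + 1) 0)) s0
  (PySem.List.pyRange 0 (n - m + 1) 1).foldl
    (fun ans i => max ans (PySem.List.pyGetD s (i + m) 0 - PySem.List.pyGetD s i 0
      + (PySem.List.slice a' (some (i + 1)) (some (i + m + 1))).sum
      + PySem.Int.floordiv (m * (m + 1)) 2))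
    (-(10 : Int) ^ 18)

-- ===== PORT B =====
def solve_alt (n : Int) (m : Int) (a : List Int) : Int :=
  let c := PySem.Int.floordiv (m * (m + 1)) 2
  let w0 := (PySem.List.slice a none (some m)).sum
  let r := (PySem.List.pyRange 0 (n - m + 1) 1).foldl
    (fun (p : Int × Int) i =>
      let best := max p.1 (2 * p.2 + c)
      let w := if i + m < n then p.2 + PySem.List.pyGetD a (i + m) 0 - PySem.List.pyGetD a i 0 else p.2
      (best, w)) ((-(10 : Int) ^ 18), w0)
  r.1

-- ===== PRECONDITION & SPEC =====
-- Pre_ is exactly where A returns: A raises IndexError when 1 ≤ n > len(a) (building s), and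
-- when m < 0 with the main loop nonempty (s[i] with i up to n-m > n).
def Pre_solve (n : Int) (m : Int) (a : List Int) : Prop :=
  (0 ≤ n → n ≤ (a.length : Int)) ∧ (0 ≤ m ∨ n + 1 ≤ m)
instance (n : Int) (m : Int) (a : List Int) : Decidable (Pre_solve n m a) := by
  unfold Pre_solve; infer_instance
def pvWitness_solve : Int × Int × List Int := (4, 2, [3, -1, 4, 1])
def Spec_solve (n : Int) (m : Int) (a : List Int) (out : Int) : Prop := out = solve_alt n m a
instance (n : Int) (m : Int) (a : List Int) (out : Int) : Decidable (Spec_solve n m a out) := by unfold Spec_solve; infer_instance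

-- ===== CLAIM (what is proved, stated in full; the proofs are below) =====
def Claim_equal_solve : Prop := ∀ (n : Int) (m : Int) (a : List Int), Dom_solve n m a → Pre_solve n m a → Spec_solve n m a (solve n m a)

-- ===== LEMMAS AND PROOFS =====

-- window sum of length m starting at position i (natural-number view)
def pvW (a : List Int) (m i : Nat) : Int := ((a.drop i).take m).sum
-- prefix sum
def pvP (a : List Int) (i : Nat) : Int := (a.take i).sum

-- common reference fold both ports are reduced to
def pvF (n m : Int) (a : List Int) (c : Int) : Int :=
  (PySem.List.pyRange 0 (n - m + 1) 1).foldl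
    (fun ans i => max ans (2 * pvW a m.toNat i.toNat + c)) (-(10 : Int) ^ 18)

theorem pvP_sub (a : List Int) (m i : Nat) :
    pvP a (i + m) - pvP a i = pvW a m i := by
  unfold pvP pvW
  rw [List.take_add, List.sum_append]
  ring

theorem pvP_succ (a : List Int) (k : Nat) (hk : k < a.length) :
    pvP a (k + 1) = pvP a k + a[k] := by
  unfold pvP
  exact List.sum_take_succ a k hk

-- characterisation of A's prefix-sum table after the first loop
theorem pvS_inv (n : Int) (a : List Int) (hn : 0 ≤ n) (hlen : n ≤ (a.length : Int))
    (k : Nat) (hk : (k : Int) ≤ n) :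
    (PySem.List.pyRange 0 (k : Int) 1).foldl
      (fun s i => PySem.List.pySetD s (i + 1)
        (PySem.List.pyGetD s i 0 + PySem.List.pyGetD (0 :: a) (i + 1) 0))
      (List.replicate (n + 1).toNat 0)
    = (List.range (k + 1)).map (pvP a) ++ List.replicate ((n + 1).toNat - (k + 1)) 0 := by
  induction k with
  | zero =>
      have h1 : (n + 1).toNat = ((n + 1).toNat - 1) + 1 := by omega
      conv_lhs => rw [h1]
      simp [pvP, List.replicate_succ]
  | succ k ih =>
      have hk' : (k : Int) ≤ n := by push_cast at hk ⊢; omega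
      have hstep : PySem.List.pyRange 0 ((k : Int) + 1) 1
          = PySem.List.pyRange 0 (k : Int) 1 ++ [(k : Int)] := by
        exact PySem.List.pyRange_one_succ_right (by omega)
      have hcast : ((k + 1 : Nat) : Int) = (k : Int) + 1 := by push_cast; ring
      rw [hcast, hstep, List.foldl_append, ih hk']
      have hklt : k < a.length := by omega
      have hlenpre : ((List.range (k + 1)).map (pvP a)).length = k + 1 := by simp
      have hrep : (n + 1).toNat - (k + 1) = ((n + 1).toNat - (k + 2)) + 1 := by omega
      -- the read of s[k]
      have hget : PySem.List.pyGetD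
          ((List.range (k + 1)).map (pvP a) ++ List.replicate ((n + 1).toNat - (k + 1)) 0) (k : Int) 0
          = pvP a k := by
        rw [PySem.List.pyGetD_natCast, List.getD_eq_getElem?_getD,
          List.getElem?_append_left (by simp), List.getElem?_map,
          List.getElem?_range (by omega)]
        rfl
      -- the read of a'[k+1]
      have hget2 : PySem.List.pyGetD (0 :: a) ((k : Int) + 1) 0 = a[k] := by
        have : ((k : Int) + 1) = ((k + 1 : Nat) : Int) := by push_cast; ring
        rw [this, PySem.List.pyGetD_natCast]
        simp [List.getD, hklt]
      simp only [List.foldl_cons, List.foldl_nil, hget, hget2]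
      rw [show ((k : Int) + 1) = ((k + 1 : Nat) : Int) by push_cast; ring,
        PySem.List.pySetD_natCast, List.set_append]
      rw [hrep, List.replicate_succ]
      simp [List.range_succ, pvP_succ a k hklt]

-- A reduces to the reference fold (main case 0 ≤ m ≤ n ≤ len a)
theorem solve_eq_pvF (n m : Int) (a : List Int) (hm : 0 ≤ m) (hmn : m ≤ n)
    (hlen : n ≤ (a.length : Int)) :
    solve n m a = pvF n m a (PySem.Int.floordiv (m * (m + 1)) 2) := by
  have hn : 0 ≤ n := le_trans hm hmn
  unfold solve pvF
  have hs := pvS_inv n a hn hlen n.toNat (by omega)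
  rw [show ((n.toNat : Int)) = n by omega] at hs
  simp only [hs]
  have hrep0 : (n + 1).toNat - (n.toNat + 1) = 0 := by omega
  rw [hrep0]
  apply PySem.List.foldl_congr_mem
  intro acc i hi
  rw [PySem.List.mem_pyRange_one] at hi
  obtain ⟨hi0, hi1⟩ := hi
  have hiA : (i + m).toNat ≤ n.toNat := by omega
  have hiB : i.toNat ≤ n.toNat := by omega
  have hgetS : ∀ (j : Nat), j ≤ n.toNat →
      PySem.List.pyGetD ((List.range (n.toNat + 1)).map (pvP a) ++ List.replicate 0 (0:Int)) (j : Int) 0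
      = pvP a j := by
    intro j hj
    rw [PySem.List.pyGetD_natCast, List.getD_eq_getElem?_getD]
    simp only [List.replicate_zero, List.append_nil, List.getElem?_map,
      List.getElem?_range (Nat.lt_succ_of_le hj), Option.map_some, Option.getD_some]
  have h1 : PySem.List.pyGetD ((List.range (n.toNat + 1)).map (pvP a) ++ List.replicate 0 (0:Int)) (i + m) 0
      = pvP a (i + m).toNat := by
    rw [show (i + m) = (((i + m).toNat : Int)) by omega]; exact hgetS _ hiA
  have h2 : PySem.List.pyGetD ((List.range (n.toNat + 1)).map (pvP a) ++ List.replicate 0 (0:Int)) i 0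
      = pvP a i.toNat := by
    rw [show i = ((i.toNat : Int)) by omega]; exact hgetS _ hiB
  have hsl : (PySem.List.slice (0 :: a) (some (i + 1)) (some (i + m + 1))).sum
      = pvW a m.toNat i.toNat := by
    rw [PySem.List.slice_toNat]
    · rw [show (i + 1).toNat = i.toNat + 1 by omega,
          show (i + m + 1).toNat - (i.toNat + 1) = m.toNat by omega]
      simp [pvW]
    · omega
    · omega
  rw [h1, h2, hsl, show (i + m).toNat = i.toNat + m.toNat by omega, pvP_sub]
  congr 1
  ring

-- B's sliding-window invariant: after j steps the pair is (partial max, window sum at j)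
theorem pvB_inv (n m : Int) (a : List Int) (hm : 0 ≤ m) (hlen : n ≤ (a.length : Int))
    (c w0 : Int) (hw0 : w0 = pvW a m.toNat 0)
    (j : Nat) (hj : (j : Int) ≤ n - m) :
    (PySem.List.pyRange 0 (j : Int) 1).foldl
      (fun (p : Int × Int) i =>
        (max p.1 (2 * p.2 + c),
         if i + m < n then p.2 + PySem.List.pyGetD a (i + m) 0 - PySem.List.pyGetD a i 0 else p.2))
      ((-(10 : Int) ^ 18), w0)
    = ((PySem.List.pyRange 0 (j : Int) 1).foldl
        (fun ans i => max ans (2 * pvW a m.toNat i.toNat + c)) (-(10 : Int) ^ 18),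
       pvW a m.toNat j) := by
  induction j with
  | zero => simp [hw0]
  | succ j ih =>
      have hj' : (j : Int) ≤ n - m := by push_cast at hj ⊢; omega
      have hstep : PySem.List.pyRange 0 ((j : Int) + 1) 1
          = PySem.List.pyRange 0 (j : Int) 1 ++ [(j : Int)] := by
        exact PySem.List.pyRange_one_succ_right (by omega)
      have hcast : ((j + 1 : Nat) : Int) = (j : Int) + 1 := by push_cast; ring
      rw [hcast, hstep, List.foldl_append, List.foldl_append, ih hj']
      simp only [List.foldl_cons, List.foldl_nil]
      have hjm : (j : Int) + m < n := by push_cast at hj; omega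
      have hjmlt : j + m.toNat < a.length := by omega
      have hjlt : j < a.length := by omega
      rw [if_pos hjm]
      have hga : PySem.List.pyGetD a ((j : Int) + m) 0 = a[j + m.toNat] := by
        rw [show ((j : Int) + m) = ((j + m.toNat : Nat) : Int) by push_cast; omega,
          PySem.List.pyGetD_natCast]
        simp [List.getD, hjmlt]
      have hgb : PySem.List.pyGetD a (j : Int) 0 = a[j] := by
        rw [PySem.List.pyGetD_natCast]; simp [List.getD, hjlt]
      have hslide : pvW a m.toNat j + a[j + m.toNat] - a[j] = pvW a m.toNat (j + 1) := by
        have e1 : pvP a (j + m.toNat) - pvP a j = pvW a m.toNat j := pvP_sub a m.toNat j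
        have e2 : pvP a (j + 1 + m.toNat) - pvP a (j + 1) = pvW a m.toNat (j + 1) := pvP_sub a m.toNat (j + 1)
        have e3 : pvP a (j + m.toNat + 1) = pvP a (j + m.toNat) + a[j + m.toNat] := pvP_succ a _ hjmlt
        have e4 : pvP a (j + 1) = pvP a j + a[j] := pvP_succ a _ hjlt
        rw [show j + 1 + m.toNat = j + m.toNat + 1 by omega] at e2
        omega
      rw [hga, hgb, hslide]
      simp

theorem solve_alt_eq_pvF (n m : Int) (a : List Int) (hm : 0 ≤ m) (hmn : m ≤ n)
    (hlen : n ≤ (a.length : Int)) :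
    solve_alt n m a = pvF n m a (PySem.Int.floordiv (m * (m + 1)) 2) := by
  unfold solve_alt pvF
  dsimp only
  have hw0 : (PySem.List.slice a none (some m)).sum = pvW a m.toNat 0 := by
    rw [PySem.List.slice_to]
    · simp [pvW]
    · exact hm
  have hsplit : PySem.List.pyRange 0 (n - m + 1) 1
      = PySem.List.pyRange 0 (n - m) 1 ++ [n - m] := by
    exact PySem.List.pyRange_one_succ_right (by omega)
  have hnm : ((n - m).toNat : Int) = n - m := by omega
  have hinv := pvB_inv n m a hm hlen (PySem.Int.floordiv (m * (m + 1)) 2)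
    ((PySem.List.slice a none (some m)).sum) hw0 (n - m).toNat (by omega)
  rw [hnm] at hinv
  rw [hsplit, List.foldl_append, List.foldl_append, hinv]
  simp

-- degenerate case: empty main loop in both programs
theorem both_default (n m : Int) (a : List Int) (h : n - m + 1 ≤ 0) :
    solve n m a = solve_alt n m a := by
  simp only [solve, solve_alt]
  rw [PySem.List.pyRange_one_eq_nil (show n - m + 1 ≤ 0 by omega)]
  simp

-- ===== VERDICT (by name: the statement is the Claim_ definition above) =====
theorem solve_spec : Claim_equal_solve := by
  intro n m a _ hpre
  unfold Spec_solve
  obtain ⟨h1, h2⟩ := hpre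
  by_cases hc : n - m + 1 ≤ 0
  · exact both_default n m a hc
  · have hmn : m ≤ n := by omega
    have hm : 0 ≤ m := by omega
    have hlen : n ≤ (a.length : Int) := h1 (le_trans hm hmn)
    rw [solve_eq_pvF n m a hm hmn hlen, solve_alt_eq_pvF n m a hm hmn hlen]
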